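-- pv_equiv track=rewrite | github.com/ngonar/kidwe_lab | Algorithm/max_spending.py | getMaximumSpending
-- ===== SOURCE A (Python) =====
-- def getMaximumSpending(books, budget):
--     total_spending = 0
--     total_books = 0
--     books.sort()
--     for b in books:
--         if total_spending + b < budget:
--             total_spending += b
--             total_books += 1
--
--     return total_books, total_spending
-- ===== SOURCE B (Python) =====
-- def getMaximumSpending(books, budget):
--     books.sort()
--     prefix = []
--     run = 0
--     for b in books:
--         run += b
--         prefix.append(run)
--     total_books = len(prefix)
--     for i, p in enumerate(prefix):
--         if p >= budget:
--             total_books = i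
--             break
--     total_spending = prefix[total_books - 1] if total_books > 0 else 0
--     return total_books, total_spending
-- ===== Notes on version B (the rewrite author's own statement) =====
-- stated objective: alternative
-- what changed: Replaced A's single greedy fold that conditionally accumulates spending with a two-phase decomposition: build the full prefix-sum table of the sorted list, then find the first index whose prefix sum reaches the budget (correct even with negative prices, justified by sortedness).
import Mathlib
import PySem

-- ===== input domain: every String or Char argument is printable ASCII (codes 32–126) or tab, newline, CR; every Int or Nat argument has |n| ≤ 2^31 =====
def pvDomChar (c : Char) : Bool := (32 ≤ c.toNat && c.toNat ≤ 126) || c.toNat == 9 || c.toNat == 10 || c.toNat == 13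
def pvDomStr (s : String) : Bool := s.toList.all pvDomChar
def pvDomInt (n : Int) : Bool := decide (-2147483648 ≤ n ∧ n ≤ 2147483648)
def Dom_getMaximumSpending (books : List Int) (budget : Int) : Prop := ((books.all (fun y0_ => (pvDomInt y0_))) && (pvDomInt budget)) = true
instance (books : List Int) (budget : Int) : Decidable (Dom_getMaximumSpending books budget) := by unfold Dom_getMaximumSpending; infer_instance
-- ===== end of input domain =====

-- B replaces A's greedy conditional fold by a prefix-sum table plus a first-crossing scan
-- (an alternative decomposition of the same cost; equivalence proved via sortedness).
-- Both Pythons sort the argument list in place; the theorems here are about the return value.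

-- ===== PORT A =====
def getMaximumSpending (books : List Int) (budget : Int) : Int × Int :=
  let sortedBooks := PySem.List.sorted books (fun x => x) false
  let st := sortedBooks.foldl
    (fun (st : Int × Int) b => if st.1 + b < budget then (st.1 + b, st.2 + 1) else st)
    ((0 : Int), (0 : Int))
  (st.2, st.1)

-- ===== PORT B =====
-- prefix-sum table (the running-sum loop of Source B)
def pvPrefix (run : Int) : List Int → List Int
  | [] => []
  | b :: t => (run + b) :: pvPrefix (run + b) t

-- first index whose prefix sum reaches the budget, defaulting to the length (Source B's scan)
def pvFirstGE (budget : Int) : List Int → Int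
  | [] => 0
  | p :: t => if p ≥ budget then 0 else 1 + pvFirstGE budget t

def getMaximumSpending_alt (books : List Int) (budget : Int) : Int × Int :=
  let sortedBooks := PySem.List.sorted books (fun x => x) false
  let pfx := pvPrefix 0 sortedBooks
  let totalBooks := pvFirstGE budget pfx
  let totalSpending :=
    if totalBooks > 0 then (PySem.List.pyGet? pfx (totalBooks - 1)).getD 0 else 0
  (totalBooks, totalSpending)

-- ===== PRECONDITION & SPEC =====
def Spec_getMaximumSpending (books : List Int) (budget : Int) (out : Int × Int) : Prop := out = getMaximumSpending_alt books budget
instance (books : List Int) (budget : Int) (out : Int × Int) : Decidable (Spec_getMaximumSpending books budget out) := by unfold Spec_getMaximumSpending; infer_instance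

-- ===== CLAIM (what is proved, stated in full; the proofs are below) =====
def Claim_equal_getMaximumSpending : Prop := ∀ (books : List Int) (budget : Int), Dom_getMaximumSpending books budget → Spec_getMaximumSpending books budget (getMaximumSpending books budget)

-- ===== LEMMAS AND PROOFS =====

-- reference greedy recursion used as a bridge between the two ports
def pvGreedy (budget run : Int) : List Int → Int × Int
  | [] => (run, 0)
  | b :: t =>
    if run + b < budget then
      let r := pvGreedy budget (run + b) t
      (r.1, r.2 + 1)
    else (run, 0)

theorem pvFirstGE_nonneg (budget : Int) (l : List Int) : 0 ≤ pvFirstGE budget l := by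
  induction l with
  | nil => simp [pvFirstGE]
  | cons p t ih => simp only [pvFirstGE]; split <;> omega

theorem foldl_const_of_ge (budget : Int) (l : List Int) (s n : Int)
    (h : ∀ x ∈ l, ¬ s + x < budget) :
    l.foldl (fun (st : Int × Int) b => if st.1 + b < budget then (st.1 + b, st.2 + 1) else st) (s, n) = (s, n) := by
  induction l with
  | nil => rfl
  | cons b t ih =>
    simp only [List.foldl_cons]
    rw [if_neg (h b (by simp))]
    exact ih (fun x hx => h x (by simp [hx]))

-- A's fold over a ≤-sorted list equals the greedy recursion
theorem foldl_eq_greedy (budget : Int) (l : List Int) (hs : l.Pairwise (· ≤ ·)) :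
    ∀ run n, l.foldl (fun (st : Int × Int) b => if st.1 + b < budget then (st.1 + b, st.2 + 1) else st) (run, n)
      = ((pvGreedy budget run l).1, n + (pvGreedy budget run l).2) := by
  induction l with
  | nil => intro run n; simp [pvGreedy]
  | cons b t ih =>
    intro run n
    rcases List.pairwise_cons.mp hs with ⟨hb, ht⟩
    simp only [List.foldl_cons, pvGreedy]
    by_cases h : run + b < budget
    · rw [if_pos h]
      rw [ih ht (run + b) (n + 1)]
      simp [h]
      omega
    · rw [if_neg h]
      rw [foldl_const_of_ge budget t run n (fun x hx hlt => h (by have := hb x hx; omega))]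
      simp [h]

-- B's table-and-scan equals the greedy recursion
theorem table_eq_greedy (budget : Int) (l : List Int) : ∀ run : Int,
    pvFirstGE budget (pvPrefix run l) = (pvGreedy budget run l).2 ∧
    (0 < pvFirstGE budget (pvPrefix run l) →
      (PySem.List.pyGet? (pvPrefix run l) (pvFirstGE budget (pvPrefix run l) - 1)).getD 0
        = (pvGreedy budget run l).1) ∧
    (pvFirstGE budget (pvPrefix run l) = 0 → (pvGreedy budget run l).1 = run) := by
  induction l with
  | nil => intro run; simp [pvPrefix, pvFirstGE, pvGreedy]
  | cons b t ih =>
    intro run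
    obtain ⟨ih1, ih2, ih3⟩ := ih (run + b)
    simp only [pvPrefix, pvFirstGE, pvGreedy]
    by_cases h : run + b < budget
    · have hge : ¬ run + b ≥ budget := by omega
      rw [if_neg hge, if_pos h]
      set k := pvFirstGE budget (pvPrefix (run + b) t) with hk
      have hk0 : 0 ≤ k := pvFirstGE_nonneg _ _
      refine ⟨by omega, ?_, by omega⟩
      intro _
      have : 1 + k - 1 = k := by omega
      rw [this]
      rcases eq_or_lt_of_le hk0 with heq | hpos
      · rw [PySem.List.pyGet?_of_nonneg _ hk0]
        have hz : k.toNat = 0 := by omega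
        rw [hz]
        simp
        exact (ih3 heq.symm).symm
      · rw [PySem.List.pyGet?_of_nonneg _ hk0]
        have hpos' : 0 < k.toNat := by omega
        obtain ⟨m, hm⟩ : ∃ m, k.toNat = m + 1 := ⟨k.toNat - 1, by omega⟩
        have : ((run + b) :: pvPrefix (run + b) t)[k.toNat]? = (pvPrefix (run + b) t)[k.toNat - 1]? := by
          simp [hm]
        rw [this]
        have h2 := ih2 hpos
        rw [PySem.List.pyGet?_of_nonneg _ (by omega : (0:Int) ≤ k - 1)] at h2
        have : (k - 1).toNat = k.toNat - 1 := by omega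
        rw [this] at h2
        exact h2
    · have hge : run + b ≥ budget := by omega
      rw [if_pos hge, if_neg h]
      exact ⟨rfl, by omega, fun _ => rfl⟩

-- ===== VERDICT (by name: the statement is the Claim_ definition above) =====
theorem getMaximumSpending_spec : Claim_equal_getMaximumSpending := by
  intro books budget _
  unfold Spec_getMaximumSpending getMaximumSpending getMaximumSpending_alt
  set s := PySem.List.sorted books (fun x => x) false with hsdef
  have hs : s.Pairwise (· ≤ ·) := PySem.List.sorted_pairwise books (fun x => x)
  obtain ⟨h1, h2, h3⟩ := table_eq_greedy budget s 0
  simp only []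
  rw [foldl_eq_greedy budget s hs 0 0, h1]
  rw [h1] at h2 h3
  by_cases hk : 0 < (pvGreedy budget 0 s).2
  · rw [if_pos hk, h2 hk]
    simp
  · have hz : (pvGreedy budget 0 s).2 = 0 := by
      have := pvFirstGE_nonneg budget (pvPrefix 0 s)
      rw [h1] at this; omega
    rw [if_neg hk]
    simp [h3 hz]
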